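-- pv_equiv track=rewrite | github.com/take9999/pycheckio | CompassMapandSpyglass.py | navigation
-- ===== SOURCE A (Python) =====
-- def navigation(seaside):
--     total_move_count = 0
--     Y_row = 0
--     Y_col = 0
--     MAX_ROW = len(seaside) - 1
--     MAX_COL = len(seaside[0]) - 1
--     find_flag = {"M": False, "S": False, "C": False}
--
--     # Yの位置を探索
--     for i, row in enumerate(seaside):
--         for j, r in enumerate(row):
--             if r == "Y":
--                 Y_row = i
--                 Y_col = j
--
--     # Yの周囲を1マスずつ拡大しながら、M,C,Sを探索
--     MAX_ACTION = MAX_COL if MAX_COL > MAX_ROW else MAX_ROW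
--     for k in range(1, MAX_ACTION + 1):
--
--         # 0または最大値を超えないようにする
--         min_row = Y_row - k if (Y_row - k) > 0 else 0
--         min_col = Y_col - k if (Y_col - k) > 0 else 0
--         max_row = Y_row + k if (Y_row + k) < MAX_ROW else MAX_ROW
--         max_col = Y_col + k if (Y_col + k) < MAX_COL else MAX_COL
--
--         # 捜査範囲内でM,C,Sを探索
--         for row in range(min_row, max_row + 1):
--             for col in range(min_col, max_col + 1):
--                 cell_value = seaside[row][col]
--                 # 発見したら現在の行動回数をtotal_move_countに加算
--                 if cell_value in ["M", "S", "C"] and find_flag[cell_value] is False: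
--                     total_move_count += k
--                     find_flag[cell_value] = True
--
--     return total_move_count
-- ===== SOURCE B (Python) =====
-- def navigation(seaside):
--     # Direct computation of the move count: locate the yacht, then for each
--     # target letter take the smallest number of one-cell expansions of the
--     # spyglass square at which it is sighted (its Chebyshev distance); the
--     # search performs at most max(height, width) - 1 expansions, so targets
--     # farther than that are never sighted and count nothing.
--     height, width = len(seaside), len(seaside[0])
--     yr = yc = 0
--     for i, row in enumerate(seaside):
--         for j, ch in enumerate(row):
--             if ch == "Y":
--                 yr, yc = i, j
--     reach = max(height - 1, width - 1)
--     total = 0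
--     for target in "MSC":
--         dists = [max(abs(i - yr), abs(j - yc))
--                  for i in range(height) for j in range(width)
--                  if seaside[i][j] == target]
--         total += min((d for d in dists if d <= reach), default=0)
--     return total
-- ===== Notes on version B (the rewrite author's own statement) =====
-- stated objective: faster
-- what changed: A re-scans an expanding square window around the yacht for every radius k (O(rows*cols) work per radius, O(n^3) overall); B computes each target letter's smallest sighting distance (Chebyshev distance, capped by the search reach max(height,width)-1) in one direct pass over the height-by-width grid and sums them. Pre_ excludes the empty list and maps with a row shorter than the first, on which A raises IndexError except when its clamped search window happens to skip the short row; B's grid pass always raises there.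
-- intended difference: On maps of more than one cell that contain no 'Y' and whose top-left cell is one of M/S/C, A charges that target 1 move although the default reference (0,0) is the target's own cell (its ring search starts at radius 1), while B charges it 0, the true distance; B's sum is the intended one. — e.g. on navigation(["M", "x"]): A returns 1, B returns 0
-- outside the precondition, e.g. on navigation(['c', '', 'SSMYSY']): A returns 0, B raises IndexError
import Mathlib
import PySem

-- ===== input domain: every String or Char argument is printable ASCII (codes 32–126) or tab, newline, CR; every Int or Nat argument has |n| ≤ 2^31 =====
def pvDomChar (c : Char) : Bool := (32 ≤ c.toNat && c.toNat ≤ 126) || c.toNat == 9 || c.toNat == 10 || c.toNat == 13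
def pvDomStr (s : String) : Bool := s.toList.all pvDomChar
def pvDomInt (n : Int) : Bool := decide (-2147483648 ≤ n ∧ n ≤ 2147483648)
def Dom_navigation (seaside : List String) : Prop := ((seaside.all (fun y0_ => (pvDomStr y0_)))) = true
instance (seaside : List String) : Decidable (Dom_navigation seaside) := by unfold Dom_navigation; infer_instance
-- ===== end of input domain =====

-- B replaces A's expanding-square search (rescanning a growing window for every radius k)
-- by one direct computation of the minimal Chebyshev distance per target letter.

-- ===== PORT A =====
-- seaside[i][j]: indices are in range under Pre_navigation wherever evaluated, so pyGetD is exact there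
def pvCellA (seaside : List String) (row col : Int) : Char :=
  PySem.List.pyGetD (PySem.List.pyGetD seaside row "").toList col ' '

-- A's Y-search loop (last 'Y' over the full, possibly ragged rows wins)
def pvFindY (seaside : List String) : Int × Int :=
  (PySem.List.enumerate seaside 0).foldl
    (fun p ir =>
      (PySem.List.enumerate ir.2.toList 0).foldl
        (fun q jc => if jc.2 = 'Y' then (ir.1, jc.1) else q) p)
    (0, 0)

def navigation (seaside : List String) : Int :=
  let Y := pvFindY seaside
  let MAX_ROW : Int := PySem.List.len seaside - 1
  -- seaside[0]: IndexError on [] is excluded by Pre_navigation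
  let MAX_COL : Int := PySem.Str.len (PySem.List.pyGetD seaside 0 "") - 1
  -- find_flag = {"M": False, "S": False, "C": False}
  let findFlag : PySem.Dict Char Bool := PySem.Dict.ofList [('M', false), ('S', false), ('C', false)]
  let MAX_ACTION : Int := if MAX_COL > MAX_ROW then MAX_COL else MAX_ROW
  let st :=
    (PySem.List.pyRange 1 (MAX_ACTION + 1) 1).foldl
      (fun st k =>
        let min_row := if Y.1 - k > 0 then Y.1 - k else 0
        let min_col := if Y.2 - k > 0 then Y.2 - k else 0
        let max_row := if Y.1 + k < MAX_ROW then Y.1 + k else MAX_ROW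
        let max_col := if Y.2 + k < MAX_COL then Y.2 + k else MAX_COL
        (PySem.List.pyRange min_row (max_row + 1) 1).foldl
          (fun st row =>
            (PySem.List.pyRange min_col (max_col + 1) 1).foldl
              (fun st col =>
                let cell := pvCellA seaside row col
                -- find_flag[cell_value]: the key is always present (guard checks cell ∈ MSC), so getD is exact
                if cell ∈ ['M', 'S', 'C'] ∧ st.2.getD cell true = false then
                  (st.1 + k, st.2.insert cell true)
                else st)
              st)
          st)
      ((0 : Int), findFlag)
  st.1

-- ===== PORT B =====
-- dists = [max(abs(i - yr), abs(j - yc)) for i in range(height) for j in range(width) if seaside[i][j] == target]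
def pvDistsB (seaside : List String) (height width : Int) (y : Int × Int) (target : Char) : List Int :=
  (PySem.List.pyRange 0 height 1).flatMap (fun i =>
    (PySem.List.pyRange 0 width 1).filterMap (fun j =>
      if pvCellA seaside i j = target then some (max |i - y.1| |j - y.2|) else none))

def navigation_alt (seaside : List String) : Int :=
  let height : Int := PySem.List.len seaside
  -- len(seaside[0]): IndexError on [] is excluded by Pre_navigation
  let width : Int := PySem.Str.len (PySem.List.pyGetD seaside 0 "")
  let y := pvFindY seaside
  let reach : Int := max (height - 1) (width - 1)
  ['M', 'S', 'C'].foldl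
    (fun total target =>
      total + ((PySem.List.min? ((pvDistsB seaside height width y target).filter
        (fun d => decide (d ≤ reach))) (fun d => d)).getD 0))
    0

-- ===== PRECONDITION & SPEC =====
-- Pre_ excludes the empty list (seaside[0] raises IndexError) and maps with a row shorter than
-- the first, on which A raises IndexError except when its clamped search window happens to skip
-- the short row; B's grid pass always raises there.
def Pre_navigation (seaside : List String) : Prop :=
  seaside ≠ [] ∧ ∀ s ∈ seaside, (seaside.headD "").toList.length ≤ s.toList.length
instance (seaside : List String) : Decidable (Pre_navigation seaside) := by
  unfold Pre_navigation; infer_instance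

def pvWitness_navigation : List String := ["Yx", "xM"]

-- On maps of more than one cell that contain no 'Y' and whose top-left cell is one of M/S/C,
-- A charges that target 1 move although the default reference (0,0) is the target's own cell
-- (its ring search starts at radius 1), while B charges it 0, the true distance; B's sum is
-- the intended one.
def D_navigation (seaside : List String) : Prop :=
  (∀ s ∈ seaside, 'Y' ∉ s.toList) ∧
  (seaside.headD "").toList.headD ' ' ∈ (['M', 'S', 'C'] : List Char) ∧
  (2 ≤ seaside.length ∨ 2 ≤ (seaside.headD "").toList.length)
instance (seaside : List String) : Decidable (D_navigation seaside) := by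
  unfold D_navigation; infer_instance

def Spec_navigation (seaside : List String) (out : Int) : Prop :=
  ¬ D_navigation seaside → out = navigation_alt seaside
instance (seaside : List String) (out : Int) : Decidable (Spec_navigation seaside out) := by
  unfold Spec_navigation; infer_instance

def pvDiffWitness_navigation : List String := ["M", "x"]
def pvDiffWitnessOut_navigation : Int × Int := (1, 0)

-- ===== CLAIM (what is proved, stated in full; the proofs are below) =====
def Claim_unchanged_navigation : Prop := ∀ (seaside : List String), Dom_navigation seaside → Pre_navigation seaside → Spec_navigation seaside (navigation seaside)
def Claim_changed_navigation : Prop := Dom_navigation (pvDiffWitness_navigation) ∧ Pre_navigation (pvDiffWitness_navigation) ∧ D_navigation (pvDiffWitness_navigation) ∧ navigation (pvDiffWitness_navigation) = pvDiffWitnessOut_navigation.1 ∧ navigation_alt (pvDiffWitness_navigation) = pvDiffWitnessOut_navigation.2 ∧ pvDiffWitnessOut_navigation.1 ≠ pvDiffWitnessOut_navigation.2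
def Claim_exact_navigation : Prop := ∀ (seaside : List String), Dom_navigation seaside → Pre_navigation seaside → D_navigation seaside → navigation seaside ≠ navigation_alt seaside

-- ===== LEMMAS AND PROOFS =====

-- width of the grid: the length of the first row
def pvW (seaside : List String) : Nat := (seaside.headD "").toList.length

-- A's maximal search radius max(rows - 1, width - 1)
def pvMaxa (seaside : List String) : Int :=
  max ((seaside.length : Int) - 1) ((pvW seaside : Int) - 1)

-- all cells A's Y-search ranges over, with their row-major coordinates
def pvCellsAll (seaside : List String) : List (Int × Int × Char) :=
  (PySem.List.enumerate seaside 0).flatMap (fun ir =>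
    (PySem.List.enumerate ir.2.toList 0).map (fun jc => (ir.1, jc.1, jc.2)))

def pvM (seaside : List String) (y : Int × Int) (L : Char) : Option Int :=
  PySem.List.min? (pvDistsB seaside (seaside.length : Int) ((pvW seaside : Nat) : Int) y L) (fun d => d)

def pvPl (o : Option Int) : Int := o.getD 0

def pvFnd (o : Option Int) (k : Int) : Bool :=
  match o with
  | some m => decide (max m 1 ≤ k)
  | none => false

def pvCtr (o : Option Int) (k : Int) : Int :=
  match o with
  | some m => if max m 1 ≤ k then max m 1 else 0
  | none => 0

def pvDInv (d : PySem.Dict Char Bool) (bM bS bC : Bool) : Prop :=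
  d.getD 'M' true = bM ∧ d.getD 'S' true = bS ∧ d.getD 'C' true = bC

-- row-major order on coordinates
def pvLex (p q : Int × Int) : Prop := p.1 < q.1 ∨ (p.1 = q.1 ∧ p.2 < q.2)

lemma pv_foldl_if_getLast (l : List (Int × Int × Char)) (q : Int × Int) :
    l.foldl (fun q p => if p.2.2 = 'Y' then (p.1, p.2.1) else q) q =
      ((l.filterMap (fun p => if p.2.2 = 'Y' then some (p.1, p.2.1) else none)).getLast?).getD q := by
  induction l generalizing q with
  | nil => simp
  | cons a l ih =>
    by_cases h : a.2.2 = 'Y'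
    · simp [h, ih, List.getLast?_cons]
    · simp [h, ih]

-- the generic "last Y wins" characterisation of the Y-search fold, for any row-major cell list
lemma pv_lastY_char (cells : List (Int × Int × Char))
    (hpw : cells.Pairwise (fun p q => pvLex (p.1, p.2.1) (q.1, q.2.1))) :
    (cells.foldl (fun q p => if p.2.2 = 'Y' then (p.1, p.2.1) else q) (0, 0) = (0, 0) ∧
      ∀ p ∈ cells, p.2.2 ≠ 'Y') ∨
    (∃ p ∈ cells, p.2.2 = 'Y' ∧
      cells.foldl (fun q p => if p.2.2 = 'Y' then (p.1, p.2.1) else q) (0, 0) = (p.1, p.2.1) ∧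
      ∀ q ∈ cells, q.2.2 = 'Y' →
        q.1 < p.1 ∨ (q.1 = p.1 ∧ q.2.1 ≤ p.2.1)) := by
  have hpairY : (cells.filterMap
      (fun p => if p.2.2 = 'Y' then some (p.1, p.2.1) else none)).Pairwise pvLex := by
    refine List.Pairwise.filterMap _ (fun a a' hR b hb b' hb' => ?_) hpw
    split at hb
    · split at hb'
      · cases hb; cases hb'; exact hR
      · cases hb'
    · cases hb
  rw [pv_foldl_if_getLast]
  cases h : (cells.filterMap
      (fun p => if p.2.2 = 'Y' then some (p.1, p.2.1) else none)).getLast? with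
  | none =>
    left
    refine ⟨by simp, ?_⟩
    intro p hp hY
    have hmem : (p.1, p.2.1) ∈ cells.filterMap
        (fun p => if p.2.2 = 'Y' then some (p.1, p.2.1) else none) :=
      List.mem_filterMap.mpr ⟨p, hp, by simp [hY]⟩
    rw [List.getLast?_eq_none_iff.mp h] at hmem
    simp at hmem
  | some c =>
    right
    obtain ⟨l', hl'⟩ := List.getLast?_eq_some_iff.mp h
    have hq : c ∈ cells.filterMap
        (fun p => if p.2.2 = 'Y' then some (p.1, p.2.1) else none) := by
      rw [hl']; simp
    obtain ⟨p, hp, hpq⟩ := List.mem_filterMap.mp hq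
    by_cases hY : p.2.2 = 'Y'
    · simp only [hY, if_pos] at hpq
      have hqe : c = (p.1, p.2.1) := (Option.some_inj.mp hpq).symm
      refine ⟨p, hp, hY, by simp [hqe], ?_⟩
      intro q hq' hY'
      have hx : (q.1, q.2.1) ∈ cells.filterMap
          (fun p => if p.2.2 = 'Y' then some (p.1, p.2.1) else none) :=
        List.mem_filterMap.mpr ⟨q, hq', by simp [hY']⟩
      rw [hl'] at hx
      rcases List.mem_append.mp hx with hx | hx
      · have hpair := hpairY
        rw [hl'] at hpair
        have hlx := (List.pairwise_append.mp hpair).2.2 _ hx c (by simp)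
        rw [hqe] at hlx
        rcases hlx with hlt | ⟨heq, hlt⟩
        · exact Or.inl hlt
        · exact Or.inr ⟨heq, le_of_lt hlt⟩
      · have hxq : (q.1, q.2.1) = c := by simpa using hx
        rw [hqe] at hxq
        exact Or.inr ⟨(Prod.ext_iff.mp hxq).1, le_of_eq (Prod.ext_iff.mp hxq).2⟩
    · simp [hY] at hpq

lemma pvFindY_eq (seaside : List String) :
    pvFindY seaside =
      (pvCellsAll seaside).foldl (fun q p => if p.2.2 = 'Y' then (p.1, p.2.1) else q) (0, 0) := by
  simp [pvFindY, pvCellsAll, List.foldl_flatMap, List.foldl_map]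

lemma pv_mem_cellsAll (seaside : List String) (p : Int × Int × Char) :
    p ∈ pvCellsAll seaside ↔
      ∃ (i j : Nat) (hi : i < seaside.length) (hj : j < (seaside[i].toList.length)),
        p = ((i : Int), (j : Int), seaside[i].toList[j]) := by
  simp only [pvCellsAll, List.mem_flatMap, List.mem_map, PySem.List.mem_enumerate_iff]
  constructor
  · rintro ⟨ir, ⟨i, hi, rfl⟩, jc, ⟨j, hj, rfl⟩, rfl⟩
    exact ⟨i, j, hi, by simpa using hj, by simp⟩
  · rintro ⟨i, j, hi, hj, rfl⟩
    exact ⟨_, ⟨i, hi, rfl⟩, _, ⟨j, hj, rfl⟩, by simp⟩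

lemma pvCellA_eq (seaside : List String) (i j : Nat) (hi : i < seaside.length)
    (hj : j < seaside[i].toList.length) :
    pvCellA seaside (i : Int) (j : Int) = seaside[i].toList[j] := by
  unfold pvCellA
  rw [PySem.List.pyGetD_eq_getElem seaside "" (Int.natCast_nonneg i) (by exact_mod_cast hi)]
  rw [PySem.List.pyGetD_eq_getElem _ ' ' (Int.natCast_nonneg j) (by simpa using hj)]
  simp

lemma pv_rowlen (seaside : List String) (hpre : Pre_navigation seaside) (i : Nat)
    (hi : i < seaside.length) : pvW seaside ≤ seaside[i].toList.length :=
  hpre.2 seaside[i] (List.getElem_mem hi)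

lemma pv_cellsAll_pairwise (seaside : List String) :
    (pvCellsAll seaside).Pairwise (fun p q => pvLex (p.1, p.2.1) (q.1, q.2.1)) := by
  unfold pvCellsAll
  rw [List.pairwise_flatMap]
  constructor
  · intro ir _
    rw [List.pairwise_map]
    exact (PySem.List.pairwise_lt_enumerate _ _).imp (fun h => Or.inr ⟨rfl, by simpa using h⟩)
  · refine (PySem.List.pairwise_lt_enumerate _ _).imp ?_
    intro a b hab x hx y hy
    rw [List.mem_map] at hx hy
    obtain ⟨jc1, _, rfl⟩ := hx
    obtain ⟨jc2, _, rfl⟩ := hy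
    exact Or.inl hab

lemma pvFindY_last (seaside : List String) :
    (pvFindY seaside = (0, 0) ∧ ∀ p ∈ pvCellsAll seaside, p.2.2 ≠ 'Y') ∨
    (∃ (i j : Nat) (hi : i < seaside.length) (hj : j < seaside[i].toList.length),
        pvFindY seaside = ((i : Int), (j : Int)) ∧ seaside[i].toList[j] = 'Y' ∧
        ∀ (i' j' : Nat) (hi' : i' < seaside.length) (hj' : j' < seaside[i'].toList.length),
          seaside[i'].toList[j'] = 'Y' → i' < i ∨ (i' = i ∧ j' ≤ j)) := by
  rw [pvFindY_eq]
  rcases pv_lastY_char (pvCellsAll seaside) (pv_cellsAll_pairwise seaside) with ⟨h0, hno⟩ | hsome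
  · exact Or.inl ⟨h0, hno⟩
  · right
    obtain ⟨p, hp, hY, hfold, hmax⟩ := hsome
    obtain ⟨i, j, hi, hj, rfl⟩ := (pv_mem_cellsAll seaside p).mp hp
    refine ⟨i, j, hi, hj, by simpa using hfold, hY, ?_⟩
    intro i' j' hi' hj' hY'
    have := hmax ((i' : Int), (j' : Int), seaside[i'].toList[j'])
      ((pv_mem_cellsAll seaside _).mpr ⟨i', j', hi', hj', rfl⟩) hY'
    rcases this with hlt | ⟨heq, hle⟩
    · left
      exact_mod_cast (show (i' : Int) < (i : Int) from hlt)
    · right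
      refine ⟨by exact_mod_cast (show (i' : Int) = (i : Int) from heq), ?_⟩
      exact_mod_cast (show (j' : Int) ≤ (j : Int) from hle)

lemma pv_mem_distsB (seaside : List String) (hpre : Pre_navigation seaside) (y : Int × Int)
    (L : Char) (d : Int) :
    d ∈ pvDistsB seaside (seaside.length : Int) ((pvW seaside : Nat) : Int) y L ↔
      ∃ (i j : Nat) (hi : i < seaside.length) (hjW : j < pvW seaside)
        (hj : j < seaside[i].toList.length),
        seaside[i].toList[j] = L ∧ d = max |(i : Int) - y.1| |(j : Int) - y.2| := by
  simp only [pvDistsB, List.mem_flatMap, List.mem_filterMap, PySem.List.mem_pyRange_one]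
  constructor
  · rintro ⟨i', ⟨hi0, hi1⟩, j', ⟨hj0, hj1⟩, hval⟩
    have hi : i'.toNat < seaside.length := by omega
    have hjW : j'.toNat < pvW seaside := by omega
    have hj : j'.toNat < seaside[i'.toNat].toList.length :=
      lt_of_lt_of_le hjW (pv_rowlen seaside hpre _ hi)
    have hic : ((i'.toNat : Nat) : Int) = i' := Int.toNat_of_nonneg hi0
    have hjc : ((j'.toNat : Nat) : Int) = j' := Int.toNat_of_nonneg hj0
    rw [← hic, ← hjc, pvCellA_eq seaside i'.toNat j'.toNat hi hj] at hval
    split at hval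
    · rename_i hL
      cases hval
      exact ⟨i'.toNat, j'.toNat, hi, hjW, hj, hL, rfl⟩
    · cases hval
  · rintro ⟨i, j, hi, hjW, hj, hL, rfl⟩
    refine ⟨(i : Int), ⟨Int.natCast_nonneg i, by exact_mod_cast hi⟩,
      (j : Int), ⟨Int.natCast_nonneg j, by exact_mod_cast hjW⟩, ?_⟩
    rw [pvCellA_eq seaside i j hi hj, if_pos hL]

lemma pv_dists_nonneg (seaside : List String) (hpre : Pre_navigation seaside) (y : Int × Int)
    (L : Char) :
    ∀ d ∈ pvDistsB seaside (seaside.length : Int) ((pvW seaside : Nat) : Int) y L, 0 ≤ d := by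
  intro d hd
  obtain ⟨i, j, hi, hjW, hj, hL, rfl⟩ := (pv_mem_distsB seaside hpre y L d).mp hd
  exact le_trans (abs_nonneg _) (le_max_left _ _)

lemma pv_ring_char (k : Int) (cs : List Char) :
    ∀ (t : Int) (dct : PySem.Dict Char Bool) (bM bS bC : Bool), pvDInv dct bM bS bC →
      (cs.foldl (fun st cell =>
          if cell ∈ ['M', 'S', 'C'] ∧ st.2.getD cell true = false then
            (st.1 + k, st.2.insert cell true)
          else st) (t, dct)).1 =
        t + (if bM = false ∧ 'M' ∈ cs then k else 0) + (if bS = false ∧ 'S' ∈ cs then k else 0)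
          + (if bC = false ∧ 'C' ∈ cs then k else 0) ∧
      pvDInv (cs.foldl (fun st cell =>
          if cell ∈ ['M', 'S', 'C'] ∧ st.2.getD cell true = false then
            (st.1 + k, st.2.insert cell true)
          else st) (t, dct)).2
        (bM || decide ('M' ∈ cs)) (bS || decide ('S' ∈ cs)) (bC || decide ('C' ∈ cs)) := by
  induction cs with
  | nil =>
    intro t dct bM bS bC hInv
    refine ⟨by simp, by simpa using hInv⟩
  | cons c cs ih =>
    intro t dct bM bS bC hInv
    obtain ⟨hM, hS, hC⟩ := hInv
    rw [List.foldl_cons]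
    by_cases hcM : c = 'M'
    · subst hcM
      rcases Bool.eq_false_or_eq_true bM with hb | hb
      · rw [if_neg (by simp [hM, hb])]
        obtain ⟨h1, h2⟩ := ih t dct bM bS bC ⟨hM, hS, hC⟩
        refine ⟨by rw [h1]; simp [hb], by simpa [hb] using h2⟩
      · rw [if_pos (by simp [hM, hb])]
        obtain ⟨h1, h2⟩ := ih (t + k) (dct.insert 'M' true) true bS bC
          ⟨by simp, by simp [PySem.Dict.getD_insert, hS], by simp [PySem.Dict.getD_insert, hC]⟩
        refine ⟨by rw [h1]; simp [hb], by simpa [hb] using h2⟩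
    · by_cases hcS : c = 'S'
      · subst hcS
        rcases Bool.eq_false_or_eq_true bS with hb | hb
        · rw [if_neg (by simp [hS, hb])]
          obtain ⟨h1, h2⟩ := ih t dct bM bS bC ⟨hM, hS, hC⟩
          refine ⟨by rw [h1]; simp [hb, Ne.symm hcM], by simpa [hb, Ne.symm hcM] using h2⟩
        · rw [if_pos (by simp [hS, hb])]
          obtain ⟨h1, h2⟩ := ih (t + k) (dct.insert 'S' true) bM true bC
            ⟨by simp [PySem.Dict.getD_insert, hM], by simp, by simp [PySem.Dict.getD_insert, hC]⟩
          refine ⟨by rw [h1]; simp [hb, Ne.symm hcM]; ring, by simpa [hb, Ne.symm hcM] using h2⟩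
      · by_cases hcC : c = 'C'
        · subst hcC
          rcases Bool.eq_false_or_eq_true bC with hb | hb
          · rw [if_neg (by simp [hC, hb])]
            obtain ⟨h1, h2⟩ := ih t dct bM bS bC ⟨hM, hS, hC⟩
            refine ⟨by rw [h1]; simp [hb, Ne.symm hcM, Ne.symm hcS],
              by simpa [hb, Ne.symm hcM, Ne.symm hcS] using h2⟩
          · rw [if_pos (by simp [hC, hb])]
            obtain ⟨h1, h2⟩ := ih (t + k) (dct.insert 'C' true) bM bS true
              ⟨by simp [PySem.Dict.getD_insert, hM], by simp [PySem.Dict.getD_insert, hS], by simp⟩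
            refine ⟨by rw [h1]; simp [hb, Ne.symm hcM, Ne.symm hcS]; ring,
              by simpa [hb, Ne.symm hcM, Ne.symm hcS] using h2⟩
        · rw [if_neg (by simp [hcM, hcS, hcC])]
          obtain ⟨h1, h2⟩ := ih t dct bM bS bC ⟨hM, hS, hC⟩
          refine ⟨by rw [h1]; simp [Ne.symm hcM, Ne.symm hcS, Ne.symm hcC],
            by simpa [Ne.symm hcM, Ne.symm hcS, Ne.symm hcC] using h2⟩

-- the window A scans at radius k, flattened to its cell characters
def pvWin (seaside : List String) (y : Int × Int) (k : Int) : List Char :=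
  (PySem.List.pyRange (if y.1 - k > 0 then y.1 - k else 0)
      ((if y.1 + k < PySem.List.len seaside - 1 then y.1 + k else PySem.List.len seaside - 1) + 1) 1).flatMap
    (fun row =>
      (PySem.List.pyRange (if y.2 - k > 0 then y.2 - k else 0)
          ((if y.2 + k < PySem.Str.len (PySem.List.pyGetD seaside 0 "") - 1 then y.2 + k
            else PySem.Str.len (PySem.List.pyGetD seaside 0 "") - 1) + 1) 1).map
        (fun col => pvCellA seaside row col))

-- A's main loop, verbatim
def pvLoopA (seaside : List String) : Int × PySem.Dict Char Bool :=
  let Y := pvFindY seaside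
  let MAX_ROW : Int := PySem.List.len seaside - 1
  let MAX_COL : Int := PySem.Str.len (PySem.List.pyGetD seaside 0 "") - 1
  let findFlag : PySem.Dict Char Bool := PySem.Dict.ofList [('M', false), ('S', false), ('C', false)]
  let MAX_ACTION : Int := if MAX_COL > MAX_ROW then MAX_COL else MAX_ROW
  (PySem.List.pyRange 1 (MAX_ACTION + 1) 1).foldl
    (fun st k =>
      let min_row := if Y.1 - k > 0 then Y.1 - k else 0
      let min_col := if Y.2 - k > 0 then Y.2 - k else 0
      let max_row := if Y.1 + k < MAX_ROW then Y.1 + k else MAX_ROW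
      let max_col := if Y.2 + k < MAX_COL then Y.2 + k else MAX_COL
      (PySem.List.pyRange min_row (max_row + 1) 1).foldl
        (fun st row =>
          (PySem.List.pyRange min_col (max_col + 1) 1).foldl
            (fun st col =>
              let cell := pvCellA seaside row col
              if cell ∈ ['M', 'S', 'C'] ∧ st.2.getD cell true = false then
                (st.1 + k, st.2.insert cell true)
              else st)
            st)
        st)
    ((0 : Int), findFlag)

lemma pv_nav_eq (seaside : List String) : navigation seaside = (pvLoopA seaside).1 := rfl

lemma pv_double_fold {α : Type} (rows cols : List Int) (F : α → Char → α) (seaside : List String) (a : α) :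
    rows.foldl (fun st row => cols.foldl (fun st col => F st (pvCellA seaside row col)) st) a
      = (rows.flatMap (fun row => cols.map (fun col => pvCellA seaside row col))).foldl F a := by
  induction rows generalizing a with
  | nil => simp
  | cons r rows ih => simp [List.foldl_cons, List.flatMap_cons, List.foldl_append, List.foldl_map, ih]

lemma pv_loopA_eq (seaside : List String) :
    pvLoopA seaside =
      (PySem.List.pyRange 1 ((if PySem.Str.len (PySem.List.pyGetD seaside 0 "") - 1 > PySem.List.len seaside - 1
          then PySem.Str.len (PySem.List.pyGetD seaside 0 "") - 1 else PySem.List.len seaside - 1) + 1) 1).foldl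
        (fun st k => (pvWin seaside (pvFindY seaside) k).foldl
          (fun st cell => if cell ∈ ['M', 'S', 'C'] ∧ st.2.getD cell true = false
            then (st.1 + k, st.2.insert cell true) else st) st)
        ((0 : Int), PySem.Dict.ofList [('M', false), ('S', false), ('C', false)]) := by
  unfold pvLoopA
  apply PySem.List.foldl_congr_mem
  intro st k _
  exact pv_double_fold
    (PySem.List.pyRange (if (pvFindY seaside).1 - k > 0 then (pvFindY seaside).1 - k else 0)
      ((if (pvFindY seaside).1 + k < PySem.List.len seaside - 1 then (pvFindY seaside).1 + k
        else PySem.List.len seaside - 1) + 1) 1)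
    (PySem.List.pyRange (if (pvFindY seaside).2 - k > 0 then (pvFindY seaside).2 - k else 0)
      ((if (pvFindY seaside).2 + k < PySem.Str.len (PySem.List.pyGetD seaside 0 "") - 1
        then (pvFindY seaside).2 + k
        else PySem.Str.len (PySem.List.pyGetD seaside 0 "") - 1) + 1) 1)
    (fun st cell => if cell ∈ ['M', 'S', 'C'] ∧ st.2.getD cell true = false
      then (st.1 + k, st.2.insert cell true) else st)
    seaside st

lemma pv_width_eq (seaside : List String) :
    PySem.Str.len (PySem.List.pyGetD seaside 0 "") = ((pvW seaside : Nat) : Int) := by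
  rw [PySem.List.pyGetD_zero, PySem.Str.len_eq]
  cases seaside <;> rfl

lemma pvCtr_zero (o : Option Int) : pvCtr o 0 = 0 := by
  cases o with
  | none => rfl
  | some m =>
    have h1 : (1 : Int) ≤ max m 1 := le_max_right m 1
    simp only [pvCtr]
    rw [if_neg (by omega)]

lemma pvFnd_zero (o : Option Int) : pvFnd o 0 = false := by
  cases o with
  | none => rfl
  | some m =>
    have h1 : (1 : Int) ≤ max m 1 := le_max_right m 1
    simp only [pvFnd, decide_eq_false_iff_not]
    omega

lemma pvCtr_succ (o : Option Int) (K : Int) (hK : 0 ≤ K) (P : Prop) [Decidable P]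
    (hP : P ↔ ∃ m, o = some m ∧ m ≤ K + 1) :
    pvCtr o (K + 1) = pvCtr o K + (if pvFnd o K = false ∧ P then K + 1 else 0) := by
  cases o with
  | none => simp [pvCtr, pvFnd, hP]
  | some m =>
    have h1 : (1 : Int) ≤ max m 1 := le_max_right m 1
    have h2 : m ≤ max m 1 := le_max_left m 1
    simp only [pvCtr, pvFnd, hP, Option.some.injEq, exists_eq_left', decide_eq_false_iff_not]
    rcases max_choice m 1 with h3 | h3 <;> rw [h3] at h1 h2 ⊢ <;> split_ifs <;> omega

lemma pvFnd_succ (o : Option Int) (K : Int) (hK : 0 ≤ K) (P : Prop) [Decidable P]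
    (hP : P ↔ ∃ m, o = some m ∧ m ≤ K + 1) :
    pvFnd o (K + 1) = (pvFnd o K || decide P) := by
  cases o with
  | none => simp [pvFnd, hP]
  | some m =>
    have h2 : m ≤ max m 1 := le_max_left m 1
    simp only [pvFnd, hP, Option.some.injEq, exists_eq_left']
    rw [← Bool.decide_or]
    refine decide_eq_decide.mpr ?_
    rcases max_choice m 1 with h3 | h3 <;> rw [h3] at h2 ⊢ <;> omega

lemma pv_found_iff (seaside : List String) (y : Int × Int) (L : Char) (k : Int) :
    (∃ d ∈ pvDistsB seaside (seaside.length : Int) ((pvW seaside : Nat) : Int) y L, d ≤ k) ↔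
      ∃ m, pvM seaside y L = some m ∧ m ≤ k := by
  unfold pvM
  constructor
  · rintro ⟨d, hd, hdk⟩
    cases hmin : PySem.List.min? (pvDistsB seaside (seaside.length : Int) ((pvW seaside : Nat) : Int) y L) (fun d => d) with
    | none => rw [PySem.List.min?_eq_none_iff] at hmin; rw [hmin] at hd; simp at hd
    | some m => exact ⟨m, rfl, le_trans (PySem.List.min?_isMin hmin d hd) hdk⟩
  · rintro ⟨m, hm, hmk⟩
    exact ⟨m, PySem.List.min?_mem hm, hmk⟩

lemma pv_mem_win (seaside : List String) (hpre : Pre_navigation seaside) (k : Int) (y : Int × Int)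
    (L : Char) :
    L ∈ pvWin seaside y k ↔
      ∃ d ∈ pvDistsB seaside (seaside.length : Int) ((pvW seaside : Nat) : Int) y L, d ≤ k := by
  unfold pvWin
  rw [pv_width_eq]
  simp only [PySem.List.len_eq]
  constructor
  · intro h
    rw [List.mem_flatMap] at h
    obtain ⟨r, hr, hL2⟩ := h
    rw [List.mem_map] at hL2
    obtain ⟨c, hc, hcell⟩ := hL2
    rw [PySem.List.mem_pyRange_one] at hr hc
    have hrb : 0 ≤ r ∧ r ≤ (seaside.length : Int) - 1 ∧ r - y.1 ≤ k ∧ y.1 - r ≤ k := by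
      split_ifs at hr <;> omega
    have hcb : 0 ≤ c ∧ c ≤ ((pvW seaside : Nat) : Int) - 1 ∧ c - y.2 ≤ k ∧ y.2 - c ≤ k := by
      split_ifs at hc <;> omega
    obtain ⟨hr0, hrn, hrk1, hrk2⟩ := hrb
    obtain ⟨hc0, hcw, hck1, hck2⟩ := hcb
    have hi : r.toNat < seaside.length := by omega
    have hjW : c.toNat < pvW seaside := by omega
    have hj : c.toNat < seaside[r.toNat].toList.length :=
      lt_of_lt_of_le hjW (pv_rowlen seaside hpre _ hi)
    have hrc : r = ((r.toNat : Nat) : Int) := (Int.toNat_of_nonneg hr0).symm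
    have hcc : c = ((c.toNat : Nat) : Int) := (Int.toNat_of_nonneg hc0).symm
    refine ⟨max |(r.toNat : Int) - y.1| |(c.toNat : Int) - y.2|, ?_, ?_⟩
    · refine (pv_mem_distsB seaside hpre y L _).mpr ⟨r.toNat, c.toNat, hi, hjW, hj, ?_, rfl⟩
      rw [← pvCellA_eq seaside r.toNat c.toNat hi hj, ← hrc, ← hcc]
      exact hcell
    · rw [← hrc, ← hcc]
      exact max_le (abs_le.mpr ⟨by omega, by omega⟩) (abs_le.mpr ⟨by omega, by omega⟩)
  · rintro ⟨d, hd, hdk⟩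
    obtain ⟨i, j, hi, hjW, hj, hchar, rfl⟩ := (pv_mem_distsB seaside hpre y L d).mp hd
    obtain ⟨ha1, ha2⟩ := abs_le.mp (le_trans (le_max_left _ _) hdk)
    obtain ⟨hb1, hb2⟩ := abs_le.mp (le_trans (le_max_right _ _) hdk)
    have hii : (i : Int) < (seaside.length : Int) := by exact_mod_cast hi
    have hjj : (j : Int) < ((pvW seaside : Nat) : Int) := by exact_mod_cast hjW
    have hi0 : (0 : Int) ≤ (i : Int) := Int.natCast_nonneg i
    have hj0 : (0 : Int) ≤ (j : Int) := Int.natCast_nonneg j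
    rw [List.mem_flatMap]
    refine ⟨(i : Int), ?_, ?_⟩
    · rw [PySem.List.mem_pyRange_one]
      constructor
      · split_ifs <;> omega
      · split_ifs <;> omega
    · rw [List.mem_map]
      refine ⟨(j : Int), ?_, ?_⟩
      · rw [PySem.List.mem_pyRange_one]
        constructor
        · split_ifs <;> omega
        · split_ifs <;> omega
      · rw [pvCellA_eq seaside i j hi hj]
        exact hchar

lemma pv_ring_char' (k : Int) (cs : List Char) (st : Int × PySem.Dict Char Bool)
    (bM bS bC : Bool) (h : pvDInv st.2 bM bS bC) :
    (cs.foldl (fun st cell =>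
        if cell ∈ ['M', 'S', 'C'] ∧ st.2.getD cell true = false then
          (st.1 + k, st.2.insert cell true)
        else st) st).1 =
      st.1 + (if bM = false ∧ 'M' ∈ cs then k else 0) + (if bS = false ∧ 'S' ∈ cs then k else 0)
        + (if bC = false ∧ 'C' ∈ cs then k else 0) ∧
    pvDInv (cs.foldl (fun st cell =>
        if cell ∈ ['M', 'S', 'C'] ∧ st.2.getD cell true = false then
          (st.1 + k, st.2.insert cell true)
        else st) st).2
      (bM || decide ('M' ∈ cs)) (bS || decide ('S' ∈ cs)) (bC || decide ('C' ∈ cs)) := by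
  have h2 := pv_ring_char k cs st.1 st.2 bM bS bC h
  simpa using h2

lemma pv_loop_inv (seaside : List String) (hpre : Pre_navigation seaside) (K : Nat) :
    ((PySem.List.pyRange 1 ((K : Int) + 1) 1).foldl
        (fun st k => (pvWin seaside (pvFindY seaside) k).foldl
          (fun st cell => if cell ∈ ['M', 'S', 'C'] ∧ st.2.getD cell true = false
            then (st.1 + k, st.2.insert cell true) else st) st)
        ((0 : Int), PySem.Dict.ofList [('M', false), ('S', false), ('C', false)])).1
      = pvCtr (pvM seaside (pvFindY seaside) 'M') (K : Int)
        + pvCtr (pvM seaside (pvFindY seaside) 'S') (K : Int)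
        + pvCtr (pvM seaside (pvFindY seaside) 'C') (K : Int)
    ∧ pvDInv ((PySem.List.pyRange 1 ((K : Int) + 1) 1).foldl
        (fun st k => (pvWin seaside (pvFindY seaside) k).foldl
          (fun st cell => if cell ∈ ['M', 'S', 'C'] ∧ st.2.getD cell true = false
            then (st.1 + k, st.2.insert cell true) else st) st)
        ((0 : Int), PySem.Dict.ofList [('M', false), ('S', false), ('C', false)])).2
        (pvFnd (pvM seaside (pvFindY seaside) 'M') (K : Int))
        (pvFnd (pvM seaside (pvFindY seaside) 'S') (K : Int))
        (pvFnd (pvM seaside (pvFindY seaside) 'C') (K : Int)) := by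
  have hiff : ∀ (L : Char) (k : Int), (L ∈ pvWin seaside (pvFindY seaside) k) ↔
      ∃ m, pvM seaside (pvFindY seaside) L = some m ∧ m ≤ k := by
    intro L k
    rw [pv_mem_win seaside hpre k _ L]
    exact pv_found_iff _ _ _ _
  induction K with
  | zero =>
    rw [show ((0 : Nat) : Int) + 1 = 1 by simp, PySem.List.pyRange_one_eq_nil (le_refl 1)]
    simp only [List.foldl_nil, Nat.cast_zero]
    refine ⟨by rw [pvCtr_zero, pvCtr_zero, pvCtr_zero]; ring, ?_⟩
    rw [pvFnd_zero, pvFnd_zero, pvFnd_zero]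
    exact ⟨by decide, by decide, by decide⟩
  | succ K ih =>
    obtain ⟨ih1, ih2⟩ := ih
    have hK0 : (0 : Int) ≤ (K : Int) := Int.natCast_nonneg K
    have hcast1 : (((K + 1 : Nat)) : Int) + 1 = ((K : Int) + 1) + 1 := by push_cast; ring
    have hcast2 : (((K + 1 : Nat)) : Int) = (K : Int) + 1 := by push_cast; ring
    rw [hcast1, PySem.List.pyRange_one_succ_right (by omega), List.foldl_append,
      List.foldl_cons, List.foldl_nil]
    obtain ⟨hr1, hr2⟩ := pv_ring_char' ((K : Int) + 1)
      (pvWin seaside (pvFindY seaside) ((K : Int) + 1)) _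
      (pvFnd (pvM seaside (pvFindY seaside) 'M') (K : Int))
      (pvFnd (pvM seaside (pvFindY seaside) 'S') (K : Int))
      (pvFnd (pvM seaside (pvFindY seaside) 'C') (K : Int)) ih2
    constructor
    · rw [hr1, ih1, hcast2]
      rw [pvCtr_succ _ _ hK0 _ (hiff 'M' ((K : Int) + 1)),
          pvCtr_succ _ _ hK0 _ (hiff 'S' ((K : Int) + 1)),
          pvCtr_succ _ _ hK0 _ (hiff 'C' ((K : Int) + 1))]
      ring
    · rw [hcast2,
          pvFnd_succ _ _ hK0 _ (hiff 'M' ((K : Int) + 1)),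
          pvFnd_succ _ _ hK0 _ (hiff 'S' ((K : Int) + 1)),
          pvFnd_succ _ _ hK0 _ (hiff 'C' ((K : Int) + 1))]
      exact hr2

theorem navigation_A_char (seaside : List String) (hpre : Pre_navigation seaside) :
    navigation seaside =
      pvCtr (pvM seaside (pvFindY seaside) 'M') (pvMaxa seaside)
      + pvCtr (pvM seaside (pvFindY seaside) 'S') (pvMaxa seaside)
      + pvCtr (pvM seaside (pvFindY seaside) 'C') (pvMaxa seaside) := by
  have hn1 : 0 < seaside.length := by
    cases seaside with
    | nil => exact absurd rfl hpre.1
    | cons a l => simp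
  have hcast : (1 : Int) ≤ (seaside.length : Int) := by exact_mod_cast hn1
  have hmax0 : 0 ≤ pvMaxa seaside :=
    le_trans (by omega) (le_max_left ((seaside.length : Int) - 1) _)
  rw [pv_nav_eq, pv_loopA_eq]
  have hub : (if PySem.Str.len (PySem.List.pyGetD seaside 0 "") - 1 > PySem.List.len seaside - 1
      then PySem.Str.len (PySem.List.pyGetD seaside 0 "") - 1 else PySem.List.len seaside - 1)
      = pvMaxa seaside := by
    rw [pv_width_eq]
    unfold pvMaxa
    simp only [PySem.List.len_eq, max_def]
    split_ifs <;> omega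
  rw [hub]
  have hK : ((pvMaxa seaside).toNat : Int) = pvMaxa seaside := Int.toNat_of_nonneg hmax0
  rw [← hK]
  exact (pv_loop_inv seaside hpre (pvMaxa seaside).toNat).1

-- B's per-letter contribution: smallest distance within reach, 0 if none
def pvBv (seaside : List String) (y : Int × Int) (L : Char) : Int :=
  (PySem.List.min? ((pvDistsB seaside (seaside.length : Int) ((pvW seaside : Nat) : Int) y L).filter
    (fun d => decide (d ≤ pvMaxa seaside))) (fun d => d)).getD 0

theorem navigation_B_char (seaside : List String) :
    navigation_alt seaside =
      pvBv seaside (pvFindY seaside) 'M' + pvBv seaside (pvFindY seaside) 'S'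
        + pvBv seaside (pvFindY seaside) 'C' := by
  simp only [navigation_alt, List.foldl_cons, List.foldl_nil]
  rw [pv_width_eq, PySem.List.len_eq,
      show max ((seaside.length : Int) - 1) (((pvW seaside : Nat) : Int) - 1) = pvMaxa seaside
        from rfl]
  show 0 + pvBv seaside (pvFindY seaside) 'M' + pvBv seaside (pvFindY seaside) 'S'
      + pvBv seaside (pvFindY seaside) 'C' = _
  omega

lemma pv_head_eq (seaside : List String) (h0 : 0 < seaside.length) :
    seaside.headD "" = seaside[0] := by
  cases seaside with
  | nil => simp at h0
  | cons a l => rfl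

lemma pv_headD_char (l : List Char) (h : 0 < l.length) : l.headD ' ' = l[0] := by
  cases l with
  | nil => simp at h
  | cons a t => rfl

lemma pv_m_nonneg (seaside : List String) (hpre : Pre_navigation seaside) (y : Int × Int)
    (L : Char) (m : Int) (hm : pvM seaside y L = some m) : 0 ≤ m :=
  pv_dists_nonneg seaside hpre y L m (PySem.List.min?_mem hm)

lemma pv_m_zero (seaside : List String) (hpre : Pre_navigation seaside) (y : Int × Int)
    (L : Char) (hm : pvM seaside y L = some 0) :
    ∃ (i j : Nat) (hi : i < seaside.length) (hjW : j < pvW seaside), (i : Int) = y.1 ∧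
      (j : Int) = y.2 ∧
      ∃ (hj : j < seaside[i].toList.length), seaside[i].toList[j] = L := by
  have hmem := PySem.List.min?_mem hm
  obtain ⟨i, j, hi, hjW, hj, hchar, hd⟩ := (pv_mem_distsB seaside hpre y L 0).mp hmem
  have h1 : |((i : Int)) - y.1| = 0 := by
    have hnn := abs_nonneg ((i : Int) - y.1)
    have hle : |((i : Int)) - y.1| ≤ 0 := by
      rw [hd]; exact le_max_left _ _
    omega
  have h2 : |((j : Int)) - y.2| = 0 := by
    have hnn := abs_nonneg ((j : Int) - y.2)
    have hle : |((j : Int)) - y.2| ≤ 0 := by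
      rw [hd]; exact le_max_right _ _
    omega
  rw [abs_eq_zero, sub_eq_zero] at h1 h2
  exact ⟨i, j, hi, hjW, h1, h2, hj, hchar⟩

lemma pv_min_filter_some (l : List Int) (m R : Int) (hm : PySem.List.min? l (fun d => d) = some m)
    (hle : m ≤ R) :
    PySem.List.min? (l.filter (fun d => decide (d ≤ R))) (fun d => d) = some m := by
  have hmemf : m ∈ l.filter (fun d => decide (d ≤ R)) :=
    List.mem_filter.mpr ⟨PySem.List.min?_mem hm, by simpa using hle⟩
  cases hmin : PySem.List.min? (l.filter (fun d => decide (d ≤ R))) (fun d => d) with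
  | none =>
    rw [PySem.List.min?_eq_none_iff] at hmin
    rw [hmin] at hmemf
    simp at hmemf
  | some m' =>
    have h1 : m' ≤ m := PySem.List.min?_isMin hmin m hmemf
    have h2 : m ≤ m' :=
      PySem.List.min?_isMin hm m' (List.mem_filter.mp (PySem.List.min?_mem hmin)).1
    rw [le_antisymm h1 h2]

lemma pv_min_filter_nil (l : List Int) (m R : Int) (hm : PySem.List.min? l (fun d => d) = some m)
    (hgt : R < m) : l.filter (fun d => decide (d ≤ R)) = [] := by
  rw [List.filter_eq_nil_iff]
  intro d hd
  have := PySem.List.min?_isMin hm d hd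
  simp only [decide_eq_true_eq]
  omega

-- a letter found at positive minimal distance contributes the same to A and to B
lemma pv_contrib_pos (seaside : List String) (y : Int × Int) (L : Char) (m : Int)
    (hm : pvM seaside y L = some m) (h1 : 1 ≤ m) :
    pvCtr (pvM seaside y L) (pvMaxa seaside) = pvBv seaside y L := by
  rw [hm]
  unfold pvBv
  by_cases hle : m ≤ pvMaxa seaside
  · rw [pv_min_filter_some _ m _ (by rw [← hm]; rfl) hle]
    simp only [pvCtr, Option.getD_some]
    rw [max_eq_left h1, if_pos hle]
  · rw [pv_min_filter_nil _ m _ (by rw [← hm]; rfl) (by omega)]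
    simp only [pvCtr]
    rw [if_neg (by rw [max_eq_left h1]; omega)]
    simp [PySem.List.min?]

-- a letter whose minimal distance is 0 (it sits on the reference cell)
lemma pv_contrib_zero (seaside : List String) (y : Int × Int) (L : Char)
    (hm : pvM seaside y L = some 0) (hmax0 : 0 ≤ pvMaxa seaside) :
    pvBv seaside y L = 0 ∧
    pvCtr (pvM seaside y L) (pvMaxa seaside) = if 1 ≤ pvMaxa seaside then 1 else 0 := by
  constructor
  · unfold pvBv
    rw [pv_min_filter_some _ 0 _ (by rw [← hm]; rfl) hmax0]
    rfl
  · rw [hm]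
    simp only [pvCtr]
    rw [show max (0 : Int) 1 = 1 by simp]

lemma pv_len_pos (seaside : List String) (hpre : Pre_navigation seaside) :
    0 < seaside.length := by
  cases seaside with
  | nil => exact absurd rfl hpre.1
  | cons a l => simp

lemma pv_maxa_nonneg (seaside : List String) (hpre : Pre_navigation seaside) :
    0 ≤ pvMaxa seaside := by
  have hcast : (1 : Int) ≤ (seaside.length : Int) := by exact_mod_cast pv_len_pos seaside hpre
  exact le_trans (by omega) (le_max_left ((seaside.length : Int) - 1) _)

-- if some target's minimal distance is 0 then the map has no 'Y' at all and that
-- target is the top-left cell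
lemma pv_zero_analysis (seaside : List String) (hpre : Pre_navigation seaside) (L : Char)
    (hLY : L ≠ 'Y') (hm : pvM seaside (pvFindY seaside) L = some 0) :
    (∀ s ∈ seaside, 'Y' ∉ s.toList) ∧ (seaside.headD "").toList.headD ' ' = L := by
  obtain ⟨i, j, hi, hjW, he1, he2, hj, hchar⟩ := pv_m_zero seaside hpre (pvFindY seaside) L hm
  rcases pvFindY_last seaside with ⟨hA0, hAno⟩ | ⟨iY, jY, hiY, hjY, hAf, hAY, _⟩
  · rw [hA0] at he1 he2
    have he1' : (i : Int) = (0 : Int) := he1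
    have he2' : (j : Int) = (0 : Int) := he2
    have hii : i = 0 := by exact_mod_cast he1'
    have hjj : j = 0 := by exact_mod_cast he2'
    subst hii; subst hjj
    refine ⟨?_, by rw [pv_head_eq seaside (pv_len_pos seaside hpre), pv_headD_char _ hj, hchar]⟩
    intro s hs hYs
    obtain ⟨i', hi', rfl⟩ := List.mem_iff_getElem.mp hs
    obtain ⟨j', hj', hje⟩ := List.mem_iff_getElem.mp hYs
    exact hAno _ ((pv_mem_cellsAll seaside _).mpr ⟨i', j', hi', hj', rfl⟩) (by rw [hje])
  · exfalso
    rw [hAf] at he1 he2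
    have he1' : (i : Int) = (iY : Int) := he1
    have he2' : (j : Int) = (jY : Int) := he2
    have hii : i = iY := by exact_mod_cast he1'
    have hjj : j = jY := by exact_mod_cast he2'
    subst hii; subst hjj
    rw [hchar] at hAY
    exact hLY hAY

-- outside D_, each letter contributes the same to A and to B
lemma pv_letter (seaside : List String) (hpre : Pre_navigation seaside)
    (hnd : ¬ D_navigation seaside) (L : Char) (hL : L ∈ (['M', 'S', 'C'] : List Char))
    (hLY : L ≠ 'Y') :
    pvCtr (pvM seaside (pvFindY seaside) L) (pvMaxa seaside) =
      pvBv seaside (pvFindY seaside) L := by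
  cases hm : pvM seaside (pvFindY seaside) L with
  | none =>
    unfold pvBv
    unfold pvM at hm
    rw [PySem.List.min?_eq_none_iff] at hm
    rw [hm]
    rfl
  | some m =>
    have h0 := pv_m_nonneg seaside hpre (pvFindY seaside) L m hm
    rcases eq_or_lt_of_le h0 with hm0 | hm1
    · -- m = 0: no 'Y' anywhere and the target is the top-left cell; since D_ does not hold,
      -- the grid is a single cell, where A also counts nothing
      subst hm0
      obtain ⟨hnoY, hhead⟩ := pv_zero_analysis seaside hpre L hLY hm
      have hsmall : ¬ (2 ≤ seaside.length ∨ 2 ≤ (seaside.headD "").toList.length) := by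
        intro hbig
        exact hnd ⟨hnoY, hhead ▸ hL, hbig⟩
      push_neg at hsmall
      have hmaxa : pvMaxa seaside ≤ 0 := by
        unfold pvMaxa pvW
        have h1 : (seaside.length : Int) ≤ 1 := by exact_mod_cast Nat.lt_succ_iff.mp hsmall.1
        have h2 : (((seaside.headD "").toList.length : Nat) : Int) ≤ 1 := by
          exact_mod_cast Nat.lt_succ_iff.mp hsmall.2
        rw [max_le_iff]
        omega
      obtain ⟨hB, hA⟩ := pv_contrib_zero seaside (pvFindY seaside) L hm
        (pv_maxa_nonneg seaside hpre)
      rw [hm] at hA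
      rw [hA, hB, if_neg (by omega)]
    · rw [← hm]
      exact pv_contrib_pos seaside (pvFindY seaside) L m hm hm1

-- ===== VERDICT (by name: the statement is the Claim_ definition above) =====
theorem navigation_spec : Claim_unchanged_navigation := by
  intro seaside _ hpre hnd
  show navigation seaside = navigation_alt seaside
  rw [navigation_A_char seaside hpre, navigation_B_char seaside,
    pv_letter seaside hpre hnd 'M' (by simp) (by decide),
    pv_letter seaside hpre hnd 'S' (by simp) (by decide),
    pv_letter seaside hpre hnd 'C' (by simp) (by decide)]

set_option maxRecDepth 4000 in
theorem navigation_changed : Claim_changed_navigation := by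
  unfold Claim_changed_navigation; decide

theorem navigation_tight : Claim_exact_navigation := by
  intro seaside _ hpre hD
  obtain ⟨hnoY, hhead, hbig⟩ := hD
  have hn1 := pv_len_pos seaside hpre
  have hcastn : (1 : Int) ≤ (seaside.length : Int) := by exact_mod_cast hn1
  rw [navigation_A_char seaside hpre, navigation_B_char seaside]
  have hy0 : pvFindY seaside = (0, 0) := by
    rcases pvFindY_last seaside with ⟨hA0, _⟩ | ⟨iY, jY, hiY, hjY, _, hAY, _⟩
    · exact hA0
    · exfalso
      refine hnoY seaside[iY] (List.getElem_mem hiY) ?_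
      rw [← hAY]
      exact List.getElem_mem hjY
  have hmax1 : 1 ≤ pvMaxa seaside := by
    unfold pvMaxa pvW
    rcases hbig with hb | hb
    · refine le_trans ?_ (le_max_left ((seaside.length : Int) - 1) _)
      have : (2 : Int) ≤ (seaside.length : Int) := by exact_mod_cast hb
      omega
    · refine le_trans ?_ (le_max_right ((seaside.length : Int) - 1) _)
      have : (2 : Int) ≤ (((seaside.headD "").toList.length : Nat) : Int) := by exact_mod_cast hb
      omega
  have hW1 : 0 < (seaside.headD "").toList.length := by
    by_contra hc
    cases h2 : (seaside.headD "").toList with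
    | nil => rw [h2] at hhead; simp at hhead
    | cons a t => rw [h2] at hc; simp at hc
  set L0 := (seaside.headD "").toList.headD ' ' with hL0def
  have hj0len : 0 < seaside[0].toList.length := by
    have hle := pv_rowlen seaside hpre 0 hn1
    unfold pvW at hle
    rw [pv_head_eq seaside hn1] at hW1
    omega
  have hchar0 : seaside[0].toList[0] = L0 := by
    rw [hL0def, pv_head_eq seaside hn1, pv_headD_char _ hj0len]
  have hjW0 : (0 : Nat) < pvW seaside := hW1
  have h0mem : (0 : Int) ∈ pvDistsB seaside (seaside.length : Int) ((pvW seaside : Nat) : Int)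
      (pvFindY seaside) L0 := by
    refine (pv_mem_distsB seaside hpre _ L0 0).mpr ⟨0, 0, hn1, hjW0, hj0len, hchar0, ?_⟩
    rw [hy0]
    simp
  have hm0 : pvM seaside (pvFindY seaside) L0 = some 0 := by
    unfold pvM
    cases hmin : PySem.List.min? (pvDistsB seaside (seaside.length : Int)
        ((pvW seaside : Nat) : Int) (pvFindY seaside) L0) (fun d => d) with
    | none =>
      rw [PySem.List.min?_eq_none_iff] at hmin
      rw [hmin] at h0mem
      simp at h0mem
    | some m' =>
      have hle := PySem.List.min?_isMin hmin _ h0mem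
      have h0' := pv_dists_nonneg seaside hpre _ L0 m' (PySem.List.min?_mem hmin)
      rw [le_antisymm hle h0']
  obtain ⟨hB0, hA0⟩ := pv_contrib_zero seaside (pvFindY seaside) L0 hm0
    (pv_maxa_nonneg seaside hpre)
  have hA0' : pvCtr (pvM seaside (pvFindY seaside) L0) (pvMaxa seaside) = 1 := by
    rw [hA0, if_pos hmax1]
  have hothers : ∀ L', L' ≠ L0 →
      pvCtr (pvM seaside (pvFindY seaside) L') (pvMaxa seaside) =
        pvBv seaside (pvFindY seaside) L' := by
    intro L' hne
    cases hm : pvM seaside (pvFindY seaside) L' with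
    | none =>
      unfold pvBv
      unfold pvM at hm
      rw [PySem.List.min?_eq_none_iff] at hm
      rw [hm]
      rfl
    | some m =>
      have h0 := pv_m_nonneg seaside hpre (pvFindY seaside) L' m hm
      rcases eq_or_lt_of_le h0 with hz | hpos
      · exfalso
        obtain ⟨i, j, hi, hjW, he1, he2, hj, hchar⟩ :=
          pv_m_zero seaside hpre (pvFindY seaside) L' (by rw [hm, ← hz])
        rw [hy0] at he1 he2
        have he1' : (i : Int) = (0 : Int) := he1
        have he2' : (j : Int) = (0 : Int) := he2
        have hii : i = 0 := by exact_mod_cast he1'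
        have hjj : j = 0 := by exact_mod_cast he2'
        subst hii; subst hjj
        rw [hchar] at hchar0
        exact hne hchar0
      · rw [← hm]
        exact pv_contrib_pos seaside (pvFindY seaside) L' m hm hpos
  rcases (by simpa using hhead : L0 = 'M' ∨ L0 = 'S' ∨ L0 = 'C') with h | h | h
  · rw [h] at hA0' hB0
    rw [hA0', hB0, hothers 'S' (by rw [h]; decide), hothers 'C' (by rw [h]; decide)]
    omega
  · rw [h] at hA0' hB0
    rw [hA0', hB0, hothers 'M' (by rw [h]; decide), hothers 'C' (by rw [h]; decide)]
    omega
  · rw [h] at hA0' hB0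
    rw [hA0', hB0, hothers 'M' (by rw [h]; decide), hothers 'S' (by rw [h]; decide)]
    omega
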